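-- pv_equiv track=rewrite | github.com/Bikram-Kumar/NITA | 5th/OS/MLSchedule.py | prevent_starvation
-- ===== SOURCE A (Python) =====
-- def prevent_starvation(processes, max_wait=10):
--     time = 0
--     promoted = []
--     user_wait = {p[0]: 0 for p in processes if p[3] == "User"}
--     for _ in range(20):
--         for pid in user_wait:
--             user_wait[pid] += 1
--             if user_wait[pid] > max_wait:
--                 promoted.append(pid)
--                 user_wait[pid] = 0
--     return promoted
-- ===== SOURCE B (Python) =====
-- def prevent_starvation(processes, max_wait=10):
--     seen = {}
--     for p in processes:
--         if p[3] == "User":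
--             seen[p[0]] = None
--     user_pids = list(seen)
--     promoted = []
--     wait = 0
--     for _ in range(20):
--         wait += 1
--         if wait > max_wait:
--             promoted.extend(user_pids)
--             wait = 0
--     return promoted
-- ===== Notes on version B (the rewrite author's own statement) =====
-- stated objective: simpler
-- what changed: All per-user counters move in lockstep, so B replaces the dict of counters and the inner per-user loop with one shared scalar counter, batch-extending the deduplicated user pid list whenever it overflows.
import Mathlib
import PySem

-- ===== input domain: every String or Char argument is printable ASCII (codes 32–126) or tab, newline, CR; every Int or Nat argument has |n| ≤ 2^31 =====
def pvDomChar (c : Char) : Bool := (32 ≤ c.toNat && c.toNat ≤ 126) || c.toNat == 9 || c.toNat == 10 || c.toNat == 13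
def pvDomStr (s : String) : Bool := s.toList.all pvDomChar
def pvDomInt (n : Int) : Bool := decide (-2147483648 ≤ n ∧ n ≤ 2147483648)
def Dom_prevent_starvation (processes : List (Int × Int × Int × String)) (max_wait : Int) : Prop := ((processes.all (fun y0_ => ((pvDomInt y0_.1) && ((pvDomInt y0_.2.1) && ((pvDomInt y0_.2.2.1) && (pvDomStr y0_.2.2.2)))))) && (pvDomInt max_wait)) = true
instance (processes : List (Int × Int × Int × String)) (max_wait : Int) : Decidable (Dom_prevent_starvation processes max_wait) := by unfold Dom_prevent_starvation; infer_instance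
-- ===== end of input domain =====

-- B replaces A's dict of per-user wait counters (which all move in lockstep) and its inner
-- per-user loop by ONE shared scalar counter plus a batch extend of the deduplicated pid list.

-- ===== PORT A =====
-- one simulation round of A's inner 'for pid in user_wait' loop
def pvRoundA (max_wait : Int) (st : PySem.Dict Int Int × List Int) (pid : Int) :
    PySem.Dict Int Int × List Int :=
  let d1 := st.1.modify pid 0 (· + 1)            -- user_wait[pid] += 1
  if d1.getD pid 0 > max_wait then               -- if user_wait[pid] > max_wait
    (d1.insert pid 0, st.2 ++ [pid])             -- promoted.append(pid); user_wait[pid] = 0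
  else (d1, st.2)

def prevent_starvation (processes : List (Int × Int × Int × String)) (max_wait : Int) : List Int :=
  let user_wait : PySem.Dict Int Int :=
    processes.foldl (fun d p => if p.2.2.2 == "User" then d.insert p.1 0 else d) PySem.Dict.empty
  ((List.range 20).foldl
    (fun st _ => st.1.keys.foldl (pvRoundA max_wait) st)
    (user_wait, ([] : List Int))).2

-- ===== PORT B =====
def prevent_starvation_alt (processes : List (Int × Int × Int × String)) (max_wait : Int) : List Int :=
  let seen : PySem.Dict Int (Option Int) :=
    processes.foldl (fun d p => if p.2.2.2 == "User" then d.insert p.1 none else d) PySem.Dict.empty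
  let user_pids := seen.keys
  ((List.range 20).foldl
    (fun (st : Int × List Int) _ =>
      let w := st.1 + 1
      if w > max_wait then (0, st.2 ++ user_pids) else (w, st.2))
    ((0 : Int), ([] : List Int))).2

-- ===== PRECONDITION & SPEC =====
def Spec_prevent_starvation (processes : List (Int × Int × Int × String)) (max_wait : Int) (out : List Int) : Prop := out = prevent_starvation_alt processes max_wait
instance (processes : List (Int × Int × Int × String)) (max_wait : Int) (out : List Int) : Decidable (Spec_prevent_starvation processes max_wait out) := by unfold Spec_prevent_starvation; infer_instance

-- ===== CLAIM (what is proved, stated in full; the proofs are below) =====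
def Claim_equal_prevent_starvation : Prop := ∀ (processes : List (Int × Int × Int × String)) (max_wait : Int), Dom_prevent_starvation processes max_wait → Spec_prevent_starvation processes max_wait (prevent_starvation processes max_wait)

-- ===== LEMMAS AND PROOFS =====

-- the two builds (A's {pid:0}, B's {pid:None}) collect the same key list
lemma keys_build_eq (l : List (Int × Int × Int × String)) :
    ∀ (d1 : PySem.Dict Int Int) (d2 : PySem.Dict Int (Option Int)), d1.keys = d2.keys →
    (l.foldl (fun d p => if p.2.2.2 == "User" then d.insert p.1 0 else d) d1).keys
      = (l.foldl (fun d p => if p.2.2.2 == "User" then d.insert p.1 none else d) d2).keys := by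
  induction l with
  | nil => intro d1 d2 h; simpa using h
  | cons p t ih =>
    intro d1 d2 h
    simp only [List.foldl_cons]
    by_cases hc : p.2.2.2 == "User"
    · simp only [hc, if_true]
      apply ih
      by_cases hm : p.1 ∈ d1.keys
      · rw [PySem.Dict.keys_insert_of_contains _ _ (by simp [PySem.Dict.contains_eq_decide_mem_keys, hm]),
            PySem.Dict.keys_insert_of_contains _ _ (by simp [PySem.Dict.contains_eq_decide_mem_keys, h ▸ hm]), h]
      · rw [PySem.Dict.keys_insert_of_not_contains _ _ (by simp [PySem.Dict.contains_eq_decide_mem_keys, hm]),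
            PySem.Dict.keys_insert_of_not_contains _ _ (by simp [PySem.Dict.contains_eq_decide_mem_keys, h ▸ hm]), h]
    · simp only [hc]; exact ih d1 d2 h

-- A's freshly built dict maps every pid to 0
lemma build_getD_zero (l : List (Int × Int × Int × String)) :
    ∀ (d : PySem.Dict Int Int), (∀ k, d.getD k 0 = 0) →
    ∀ k, (l.foldl (fun d p => if p.2.2.2 == "User" then d.insert p.1 0 else d) d).getD k 0 = 0 := by
  induction l with
  | nil => intro d h k; exact h k
  | cons p t ih =>
    intro d h k
    simp only [List.foldl_cons]
    by_cases hc : p.2.2.2 == "User"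
    · simp only [hc, if_true]
      exact ih _ (fun k' => by rw [PySem.Dict.getD_insert]; split <;> simp [h]) k
    · simp only [hc]; exact ih d h k

lemma build_nodup (l : List (Int × Int × Int × String)) :
    ∀ (d : PySem.Dict Int Int), d.keys.Nodup →
    (l.foldl (fun d p => if p.2.2.2 == "User" then d.insert p.1 0 else d) d).keys.Nodup := by
  induction l with
  | nil => intro d h; exact h
  | cons p t ih =>
    intro d h
    simp only [List.foldl_cons]
    by_cases hc : p.2.2.2 == "User"
    · simp only [hc, if_true]; exact ih _ (PySem.Dict.nodup_keys_insert _ _ _ h)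
    · simp only [hc]; exact ih d h

-- one inner pass of A over a nodup key list whose counters all equal w
lemma innerA (mw w : Int) (ks : List Int) :
    ∀ (d : PySem.Dict Int Int) (P : List Int), ks.Nodup →
    (∀ k ∈ ks, k ∈ d.keys) → (∀ k ∈ ks, d.getD k 0 = w) →
    (ks.foldl (pvRoundA mw) (d, P)).2 = P ++ (if w + 1 > mw then ks else [])
    ∧ (ks.foldl (pvRoundA mw) (d, P)).1.keys = d.keys
    ∧ (∀ k, (ks.foldl (pvRoundA mw) (d, P)).1.getD k 0
        = if k ∈ ks then (if w + 1 > mw then 0 else w + 1) else d.getD k 0) := by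
  induction ks with
  | nil => intro d P _ _ _; simp
  | cons k t ih =>
    intro d P hnd hmem hval
    have hknd := hnd
    simp only [List.nodup_cons] at hknd
    obtain ⟨hkt, htnd⟩ := hknd
    have hkd : k ∈ d.keys := hmem k (List.mem_cons_self ..)
    have hv : d.getD k 0 = w := hval k (List.mem_cons_self ..)
    simp only [List.foldl_cons]
    have hstep : pvRoundA mw (d, P) k =
        if w + 1 > mw then ((d.modify k 0 (· + 1)).insert k 0, P ++ [k])
        else (d.modify k 0 (· + 1), P) := by
      simp [pvRoundA, PySem.Dict.getD_modify_self, hv]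
    have hkeys1 : (d.modify k 0 (· + 1)).keys = d.keys := by
      rw [PySem.Dict.keys_modify]
      exact PySem.Dict.keys_insert_of_contains _ _ (by simp [PySem.Dict.contains_eq_decide_mem_keys, hkd])
    by_cases hgt : w + 1 > mw
    · rw [hstep, if_pos hgt]
      have hk2 : ((d.modify k 0 (· + 1)).insert k 0).keys = d.keys := by
        rw [PySem.Dict.keys_insert_of_contains _ _
          (by simp [PySem.Dict.contains_eq_decide_mem_keys, hkeys1, hkd]), hkeys1]
      have hgd : ∀ k', ((d.modify k 0 (· + 1)).insert k 0).getD k' 0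
          = if k' = k then 0 else d.getD k' 0 := by
        intro k'
        rw [PySem.Dict.getD_insert]
        split
        · rfl
        · exact PySem.Dict.getD_modify_of_ne _ _ _ ‹_›
      obtain ⟨h1, h2, h3⟩ := ih ((d.modify k 0 (· + 1)).insert k 0) (P ++ [k]) htnd
        (fun k' hk' => by rw [hk2]; exact hmem k' (List.mem_cons_of_mem _ hk'))
        (fun k' hk' => by rw [hgd, if_neg (by rintro rfl; exact hkt hk')]; exact hval k' (List.mem_cons_of_mem _ hk'))
      refine ⟨?_, by rw [h2, hk2], ?_⟩
      · rw [h1, if_pos hgt, if_pos hgt, List.append_assoc]; rfl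
      · intro k0
        rw [h3 k0, hgd k0]
        by_cases h0 : k0 ∈ t
        · simp [h0, hgt, List.mem_cons]
        · by_cases hek : k0 = k <;> simp [h0, hek, hgt, List.mem_cons]
    · rw [hstep, if_neg hgt]
      have hgd : ∀ k', (d.modify k 0 (· + 1)).getD k' 0
          = if k' = k then w + 1 else d.getD k' 0 := by
        intro k'
        by_cases hek : k' = k
        · subst hek; simp [PySem.Dict.getD_modify_self, hv]
        · rw [PySem.Dict.getD_modify_of_ne _ _ _ hek, if_neg hek]
      obtain ⟨h1, h2, h3⟩ := ih (d.modify k 0 (· + 1)) P htnd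
        (fun k' hk' => by rw [hkeys1]; exact hmem k' (List.mem_cons_of_mem _ hk'))
        (fun k' hk' => by rw [hgd, if_neg (by rintro rfl; exact hkt hk')]; exact hval k' (List.mem_cons_of_mem _ hk'))
      refine ⟨by rw [h1, if_neg hgt, if_neg hgt], by rw [h2, hkeys1], ?_⟩
      intro k0
      rw [h3 k0, hgd k0]
      by_cases h0 : k0 ∈ t
      · simp [h0, hgt, List.mem_cons]
      · by_cases hek : k0 = k <;> simp [h0, hek, hgt, List.mem_cons]

-- the outer 20-round loops agree (A over the dict, B over the shared counter)
lemma outer_eq (mw : Int) (ks : List Int) (hnd : ks.Nodup) (l : List Nat) :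
    ∀ (d : PySem.Dict Int Int) (P : List Int) (w : Int),
    d.keys = ks → (∀ k ∈ ks, d.getD k 0 = w) →
    (l.foldl (fun st _ => st.1.keys.foldl (pvRoundA mw) st) (d, P)).2
      = (l.foldl (fun (st : Int × List Int) _ =>
          let w' := st.1 + 1
          if w' > mw then (0, st.2 ++ ks) else (w', st.2)) (w, P)).2 := by
  induction l with
  | nil => intro d P w _ _; rfl
  | cons u t ih =>
    intro d P w hkeys hval
    obtain ⟨h1, h2, h3⟩ := innerA mw w ks d P hnd (fun k hk => by rw [hkeys]; exact hk) hval
    simp only [List.foldl_cons, hkeys]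
    by_cases hgt : w + 1 > mw
    · rw [show ks.foldl (pvRoundA mw) (d, P)
          = ((ks.foldl (pvRoundA mw) (d, P)).1, (ks.foldl (pvRoundA mw) (d, P)).2) from rfl,
        h1, if_pos hgt]
      have := ih (ks.foldl (pvRoundA mw) (d, P)).1 (P ++ ks) 0
        (h2.trans hkeys) (fun k hk => by rw [h3 k]; simp [hk, hgt])
      rw [this]
      simp [hgt]
    · rw [show ks.foldl (pvRoundA mw) (d, P)
          = ((ks.foldl (pvRoundA mw) (d, P)).1, (ks.foldl (pvRoundA mw) (d, P)).2) from rfl,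
        h1, if_neg hgt, List.append_nil]
      have := ih (ks.foldl (pvRoundA mw) (d, P)).1 P (w + 1)
        (h2.trans hkeys) (fun k hk => by rw [h3 k]; simp [hk, hgt])
      rw [this]
      simp [hgt]

-- ===== VERDICT (by name: the statement is the Claim_ definition above) =====
theorem prevent_starvation_spec : Claim_equal_prevent_starvation := by
  intro processes max_wait _
  unfold Spec_prevent_starvation prevent_starvation prevent_starvation_alt
  set dA := processes.foldl (fun d p => if p.2.2.2 == "User" then d.insert p.1 0 else d)
    (PySem.Dict.empty : PySem.Dict Int Int) with hdA
  set dB := processes.foldl (fun d p => if p.2.2.2 == "User" then d.insert p.1 none else d)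
    (PySem.Dict.empty : PySem.Dict Int (Option Int)) with hdB
  have hk : dA.keys = dB.keys := keys_build_eq processes _ _ (by simp)
  have hnd : dA.keys.Nodup := build_nodup processes _ (by simp)
  have hz : ∀ k ∈ dA.keys, dA.getD k 0 = 0 :=
    fun k _ => build_getD_zero processes _ (fun k' => by simp) k
  show (List.foldl (fun st _ => st.1.keys.foldl (pvRoundA max_wait) st) (dA, []) (List.range 20)).2
      = (List.foldl (fun (st : Int × List Int) _ =>
          let w := st.1 + 1
          if w > max_wait then (0, st.2 ++ dB.keys) else (w, st.2)) (0, []) (List.range 20)).2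
  rw [← hk]
  exact outer_eq max_wait dA.keys hnd (List.range 20) dA [] 0 rfl hz
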